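-- pv_equiv track=rewrite | github.com/ivanebos/RecursiveDescentParser | assgn1.py | LookAhead
-- ===== SOURCE A (Python) =====
-- EOI = 0     # end of input
--
-- VAR = 1     # \$[A-Za-z]*
--
-- TRUE = 2    # "True"
--
-- FALSE = 3   # "False"
--
-- OR = 4      # "or"
--
-- AND = 5     # "and"
--
-- NOT = 6     # "not"
--
-- EQ = 7      # "="
--
-- LP = 8      # "\("
--
-- RP = 9      # "\)"
--
-- ERR = 11    # error
--
-- def LookAhead(s,spp):
--     j = len(s);
--     i = spp
--     if i >= j:
--         return EOI
--     while s[i]==" " or s[i]=="\n":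
--         i = i+1
--         if i >= j:
--             return EOI
--
--     if s[i] == '=':
--         return EQ
--     elif s[i:i+3] == "and":
--         return AND
--     elif s[i:i+2] == "or":
--         return OR
--     elif s[i:i+4] == "True":
--         return TRUE
--     elif s[i:i+5] == "False":
--         return FALSE
--     elif s[i:i+3] == "not":
--         return NOT
--     elif s[i] == "(":
--         return LP
--     elif s[i] == ")":
--         return RP
--     elif s[i] == "$":
--         return VAR
--     else:
--         return ERR
-- ===== SOURCE B (Python) =====
-- EOI = 0; VAR = 1; TRUE = 2; FALSE = 3; OR = 4; AND = 5; NOT = 6; EQ = 7; LP = 8; RP = 9; ERR = 11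
--
-- # data-driven token table: (prefix, token); first characters are all distinct, so order is immaterial
-- TABLE = (("=", EQ), ("and", AND), ("or", OR), ("True", TRUE),
--          ("False", FALSE), ("not", NOT), ("(", LP), (")", RP), ("$", VAR))
--
-- def LookAhead(s, spp):
--     if spp >= len(s):
--         return EOI
--     if s[spp] == " " or s[spp] == "\n":
--         return LookAhead(s, spp + 1)
--     return next((tok for kw, tok in TABLE if s.startswith(kw, spp)), ERR)
-- ===== Notes on version B (the rewrite author's own statement) =====
-- stated objective: simpler
-- what changed: Replaces A's iterative whitespace loop and hard-coded if/elif chain of slice comparisons by a recursive skip (LookAhead(s, spp+1) on whitespace) and a data-driven scan of a (prefix, token) table via next()/startswith, correct because all table prefixes start with distinct characters.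
-- outside the precondition, e.g. on LookAhead('or', -2): A returns 11, B returns 4
import Mathlib
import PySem

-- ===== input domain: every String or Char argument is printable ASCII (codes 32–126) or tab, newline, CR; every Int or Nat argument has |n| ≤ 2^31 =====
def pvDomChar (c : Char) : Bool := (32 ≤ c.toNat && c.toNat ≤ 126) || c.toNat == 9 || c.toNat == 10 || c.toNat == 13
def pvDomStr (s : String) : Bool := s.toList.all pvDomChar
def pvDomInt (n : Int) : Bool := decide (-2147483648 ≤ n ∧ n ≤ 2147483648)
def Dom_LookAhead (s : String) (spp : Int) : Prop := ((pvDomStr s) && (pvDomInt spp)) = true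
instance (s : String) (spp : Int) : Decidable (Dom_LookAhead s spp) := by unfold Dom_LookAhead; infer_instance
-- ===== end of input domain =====

-- B replaces A's iterative skip + if/elif chain by a recursive skip and a data-driven (prefix, token) table scan (simpler; not faster).

-- ===== PORT A =====
-- A's if/elif classification chain at index i (0 ≤ i < len); s[a:b] for 0 ≤ a is (drop a).take (b-a)
def pvClassifyA (cs : List Char) (i : Nat) : Int :=
  if cs[i]? = some '=' then 7
  else if (cs.drop i).take 3 = ['a','n','d'] then 5
  else if (cs.drop i).take 2 = ['o','r'] then 4
  else if (cs.drop i).take 4 = ['T','r','u','e'] then 2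
  else if (cs.drop i).take 5 = ['F','a','l','s','e'] then 3
  else if (cs.drop i).take 3 = ['n','o','t'] then 6
  else if cs[i]? = some '(' then 8
  else if cs[i]? = some ')' then 9
  else if cs[i]? = some '$' then 1
  else 11

-- A's while loop: skip ' '/'\n', returning EOI when i reaches j; entered with i < j
def pvWhileA (cs : List Char) (j i : Nat) : Int :=
  if cs[i]? = some ' ' ∨ cs[i]? = some '\n' then
    if h : i + 1 ≥ j then 0 else pvWhileA cs j (i + 1)
  else pvClassifyA cs i
termination_by j - i
decreasing_by omega

def LookAhead (s : String) (spp : Int) : Int :=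
  let cs := s.toList
  let j : Int := cs.length
  if spp ≥ j then 0 else pvWhileA cs cs.length spp.toNat

-- ===== PORT B =====
-- B's (prefix, token) table, in Source B's order
def pvTable : List (List Char × Int) :=
  [(['='], 7), (['a','n','d'], 5), (['o','r'], 4), (['T','r','u','e'], 2),
   (['F','a','l','s','e'], 3), (['n','o','t'], 6), (['('], 8), ([')'], 9), (['$'], 1)]

-- next((tok for kw, tok in TABLE if s.startswith(kw, i)), ERR)
def pvNextTok (cs : List Char) (i : Nat) : List (List Char × Int) → Int
  | [] => 11
  | (kw, tok) :: rest => if (cs.drop i).take kw.length = kw then tok else pvNextTok cs i rest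

-- B's recursion: base case EOI, whitespace → recurse at i+1, else table scan
def pvAltB (cs : List Char) (i : Nat) : Int :=
  if h : i < cs.length then
    if cs[i]? = some ' ' ∨ cs[i]? = some '\n' then pvAltB cs (i + 1)
    else pvNextTok cs i pvTable
  else 0
termination_by cs.length - i
decreasing_by omega

def LookAhead_alt (s : String) (spp : Int) : Int := pvAltB s.toList spp.toNat

-- ===== PRECONDITION & SPEC =====
-- Pre_ excludes negative spp, on which A's negative-index wraparound/slice arithmetic is accidental
-- (and A raises IndexError for spp < -len(s)); B reads the token at the normalized position there.
def Pre_LookAhead (s : String) (spp : Int) : Prop := 0 ≤ spp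
instance (s : String) (spp : Int) : Decidable (Pre_LookAhead s spp) := by unfold Pre_LookAhead; infer_instance
def pvWitness_LookAhead : String × Int := ("  True", 1)

def Spec_LookAhead (s : String) (spp : Int) (out : Int) : Prop := out = LookAhead_alt s spp
instance (s : String) (spp : Int) (out : Int) : Decidable (Spec_LookAhead s spp out) := by unfold Spec_LookAhead; infer_instance

-- ===== CLAIM (what is proved, stated in full; the proofs are below) =====
def Claim_equal_LookAhead : Prop := ∀ (s : String) (spp : Int), Dom_LookAhead s spp → Pre_LookAhead s spp → Spec_LookAhead s spp (LookAhead s spp)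

-- ===== LEMMAS AND PROOFS =====

-- A's classification chain equals B's table scan at any valid index
lemma classify_eq (cs : List Char) (i : Nat) (hi : i < cs.length) :
    pvClassifyA cs i = pvNextTok cs i pvTable := by
  obtain ⟨c, rest, hdrop⟩ : ∃ c rest, cs.drop i = c :: rest := by
    cases h : cs.drop i with
    | nil => exact absurd (List.drop_eq_nil_iff.mp h) (by omega)
    | cons c rest => exact ⟨c, rest, rfl⟩
  have hget : cs[i]? = some c := by
    have h := congrArg (·[0]?) hdrop
    simpa [List.getElem?_drop] using h
  simp [pvClassifyA, pvNextTok, pvTable, hget, hdrop]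

-- A's while loop equals B's recursion, for any entry index i < length
lemma loop_eq : ∀ (k : Nat) (cs : List Char) (i : Nat), cs.length - i = k → i < cs.length →
    pvWhileA cs cs.length i = pvAltB cs i := by
  intro k
  induction k using Nat.strong_induction_on with
  | _ k ih =>
    intro cs i hk hi
    unfold pvWhileA pvAltB
    rw [dif_pos hi]
    by_cases hws : cs[i]? = some ' ' ∨ cs[i]? = some '\n'
    · rw [if_pos hws, if_pos hws]
      by_cases hend : i + 1 ≥ cs.length
      · rw [dif_pos hend]
        unfold pvAltB
        rw [dif_neg (by omega)]
      · rw [dif_neg hend]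
        exact ih (cs.length - (i + 1)) (by omega) cs (i + 1) rfl (by omega)
    · rw [if_neg hws, if_neg hws]
      exact classify_eq cs i hi

-- ===== VERDICT (by name: the statement is the Claim_ definition above) =====
theorem LookAhead_spec : Claim_equal_LookAhead := by
  intro s spp _ hpre
  unfold Pre_LookAhead at hpre
  unfold Spec_LookAhead LookAhead LookAhead_alt
  simp only []
  by_cases hbig : spp ≥ (s.toList.length : Int)
  · rw [if_pos hbig]
    unfold pvAltB
    rw [dif_neg (by omega)]
  · rw [if_neg hbig]
    exact loop_eq (s.toList.length - spp.toNat) s.toList spp.toNat rfl (by omega)
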